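-- pv_equiv track=rewrite | github.com/Vicente-Martins09/CC | src/Metodo_SelecNodes.py | ordena_por_nodes
-- ===== SOURCE A (Python) =====
-- def ordena_por_nodes(listaIps):
--    tam = len(listaIps)
--    blocos_nodes = []
--    aux = 1
--
--    while (len(blocos_nodes) != tam):
--       i = 0
--       for array in listaIps:
--          if len(array) == aux:
--             blocos_nodes.append((array, i))
--          i += 1
--       aux += 1
--
--    return blocos_nodes
-- ===== SOURCE B (Python) =====
-- def ordena_por_nodes(listaIps):
--     return sorted([(array, i) for i, array in enumerate(listaIps)],
--                   key=lambda par: len(par[0]))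
-- ===== Notes on version B (the rewrite author's own statement) =====
-- stated objective: simpler
-- what changed: Replaces A's repeated full rescans (one pass per candidate length, driven by a count-checking while loop) with a single stable sort of the enumerated (array, index) pairs keyed by array length; Pre_ excludes inputs containing an empty array, on which A loops forever.
import Mathlib
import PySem

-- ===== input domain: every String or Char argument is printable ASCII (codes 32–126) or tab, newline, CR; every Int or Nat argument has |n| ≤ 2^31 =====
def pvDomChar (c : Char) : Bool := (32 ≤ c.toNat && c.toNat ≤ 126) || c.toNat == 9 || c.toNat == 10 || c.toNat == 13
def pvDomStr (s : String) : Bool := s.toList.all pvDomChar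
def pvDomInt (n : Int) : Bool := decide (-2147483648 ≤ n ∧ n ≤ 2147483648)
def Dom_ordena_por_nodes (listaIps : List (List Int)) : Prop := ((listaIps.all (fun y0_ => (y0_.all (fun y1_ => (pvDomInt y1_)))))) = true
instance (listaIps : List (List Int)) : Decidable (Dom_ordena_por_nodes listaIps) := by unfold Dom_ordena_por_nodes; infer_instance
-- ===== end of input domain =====

-- B replaces A's while-loop of repeated full rescans by one stable sort of the enumerated
-- pairs keyed by array length (objective: simpler).

-- ===== PORT A =====
-- the inner 'for array in listaIps' pass with the running counter i, appending (array, i) on len(array) == aux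
def pvPassA (listaIps : List (List Int)) (aux : Int) (acc : List (List Int × Int)) : List (List Int × Int) :=
  (listaIps.foldl
    (fun (s : List (List Int × Int) × Int) array =>
      (if PySem.List.len array = aux then s.1 ++ [(array, s.2)] else s.1, s.2 + 1))
    (acc, 0)).1

-- the 'while len(blocos_nodes) != tam' loop; the Nat fuel only makes the recursion total
-- (under Pre_ the given fuel is never exhausted, so each step is exactly one while-iteration)
def pvLoopA (listaIps : List (List Int)) : Nat → Int → List (List Int × Int) → List (List Int × Int)
  | 0, _, acc => acc
  | fuel + 1, aux, acc =>
      if PySem.List.len acc ≠ PySem.List.len listaIps then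
        pvLoopA listaIps fuel (aux + 1) (pvPassA listaIps aux acc)
      else acc

def ordena_por_nodes (listaIps : List (List Int)) : List (List Int × Int) :=
  pvLoopA listaIps (listaIps.foldl (fun m a => max m a.length) 0 + 1) 1 []

-- ===== PORT B =====
def ordena_por_nodes_alt (listaIps : List (List Int)) : List (List Int × Int) :=
  PySem.List.sorted
    ((PySem.List.enumerate listaIps 0).map (fun p => (p.2, p.1)))
    (fun par => PySem.List.len par.1) false

-- ===== PRECONDITION & SPEC =====
-- Pre_ excludes inputs containing an empty array: there A's while loop never reaches
-- len(blocos_nodes) == tam and the Python loops forever (A never returns).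
def Pre_ordena_por_nodes (listaIps : List (List Int)) : Prop :=
  ∀ a ∈ listaIps, a ≠ []

instance (listaIps : List (List Int)) : Decidable (Pre_ordena_por_nodes listaIps) := by
  unfold Pre_ordena_por_nodes; infer_instance

def pvWitness_ordena_por_nodes : List (List Int) := [[1, 2], [3], [4, 5]]

def Spec_ordena_por_nodes (listaIps : List (List Int)) (out : List (List Int × Int)) : Prop := out = ordena_por_nodes_alt listaIps
instance (listaIps : List (List Int)) (out : List (List Int × Int)) : Decidable (Spec_ordena_por_nodes listaIps out) := by unfold Spec_ordena_por_nodes; infer_instance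

-- ===== CLAIM (what is proved, stated in full; the proofs are below) =====
def Claim_equal_ordena_por_nodes : Prop := ∀ (listaIps : List (List Int)), Dom_ordena_por_nodes listaIps → Pre_ordena_por_nodes listaIps → Spec_ordena_por_nodes listaIps (ordena_por_nodes listaIps)

-- ===== LEMMAS AND PROOFS =====

-- the (array, original index) pairs B sorts
def pvPairs (listaIps : List (List Int)) : List (List Int × Int) :=
  (PySem.List.enumerate listaIps 0).map (fun p => (p.2, p.1))

-- lengths 1, 2, …, n as Ints (the aux values A's loop has already emitted)
def pvKs (n : Nat) : List Int := (List.range n).map (fun (t : Nat) => (t : Int) + 1)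

def pvBucket (l : List (List Int × Int)) (k : Int) : List (List Int × Int) :=
  l.filter (fun p => decide (PySem.List.len p.1 = k))

def pvFlat (l : List (List Int × Int)) (n : Nat) : List (List Int × Int) :=
  (pvKs n).flatMap (fun k => pvBucket l k)

lemma pvKs_mem (n : Nat) (k : Int) : k ∈ pvKs n ↔ 1 ≤ k ∧ k ≤ (n : Int) := by
  simp only [pvKs, List.mem_map, List.mem_range]
  constructor
  · rintro ⟨t, ht, rfl⟩; omega
  · rintro ⟨h1, h2⟩; exact ⟨(k - 1).toNat, by omega, by omega⟩

lemma pvKs_pairwise (n : Nat) : (pvKs n).Pairwise (· < ·) := by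
  unfold pvKs
  exact List.Pairwise.map _ (fun a b h => by omega) (List.pairwise_lt_range (n := n))

lemma pvKs_succ (n : Nat) : pvKs (n + 1) = pvKs n ++ [(n : Int) + 1] := by
  simp [pvKs, List.range_succ]

lemma enumerate_mem_snd {α : Type} (xs : List α) (i : Int) (p : Int × α)
    (hp : p ∈ PySem.List.enumerate xs i) : p.2 ∈ xs := by
  induction xs generalizing i with
  | nil => simp [PySem.List.enumerate] at hp
  | cons x t ih =>
    simp only [PySem.List.enumerate, List.mem_cons] at hp
    rcases hp with rfl | hp
    · simp
    · exact List.mem_cons_of_mem _ (ih (i + 1) hp)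

lemma pvPairs_fst_mem (listaIps : List (List Int)) (p : List Int × Int)
    (hp : p ∈ pvPairs listaIps) : p.1 ∈ listaIps := by
  simp only [pvPairs, List.mem_map] at hp
  rcases hp with ⟨q, hq, rfl⟩
  exact enumerate_mem_snd _ _ _ hq

lemma pvPairs_length (listaIps : List (List Int)) :
    (pvPairs listaIps).length = listaIps.length := by
  simp [pvPairs]

-- maximum length bound: every array's length is at most the running max
lemma max_len_bound (listaIps : List (List Int)) (a : List Int) (ha : a ∈ listaIps) :
    a.length ≤ listaIps.foldl (fun m b => max m b.length) 0 :=
  (PySem.List.le_foldl_max_nat listaIps (fun b => b.length) 0).2 a ha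

-- insertBy skips a prefix it is not inserted into
lemma insertBy_append_skip {α : Type} (before : α → α → Bool) (x : α) (as bs : List α)
    (h : ∀ y ∈ as, before x y = false) :
    PySem.List.insertBy before x (as ++ bs) = as ++ PySem.List.insertBy before x bs := by
  induction as with
  | nil => simp
  | cons a t ih =>
    have ha : before x a = false := h a (by simp)
    simp only [List.cons_append, PySem.List.insertBy, ha]
    simp [ih (fun y hy => h y (by simp [hy]))]

-- insertBy puts x at the head when it goes before everything
lemma insertBy_all_before {α : Type} (before : α → α → Bool) (x : α) (ys : List α)
    (h : ∀ y ∈ ys, before x y = true) :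
    PySem.List.insertBy before x ys = x :: ys := by
  cases ys with
  | nil => rfl
  | cons y t => simp [PySem.List.insertBy, h y (by simp)]

-- membership in a bucket fixes the key
lemma mem_bucket (l : List (List Int × Int)) (k : Int) (y : List Int × Int)
    (hy : y ∈ pvBucket l k) : PySem.List.len y.1 = k :=
  of_decide_eq_true (List.mem_filter.1 hy).2

-- inserting x into the bucketed form extends its own bucket at the end
lemma insertBy_flat (ks : List Int) (hp : ks.Pairwise (· < ·))
    (x : List Int × Int) (hx : PySem.List.len x.1 ∈ ks) (l : List (List Int × Int)) :
    PySem.List.insertBy (fun a b => decide (PySem.List.len a.1 < PySem.List.len b.1)) x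
      (ks.flatMap (fun k => pvBucket l k))
    = ks.flatMap (fun k => pvBucket (l ++ [x]) k) := by
  induction ks with
  | nil => simp at hx
  | cons k ks' ih =>
    have hgt : ∀ k' ∈ ks', k < k' := fun k' h => (List.pairwise_cons.1 hp).1 k' h
    have hbucket : ∀ k' : Int, pvBucket (l ++ [x]) k'
        = pvBucket l k' ++ (if PySem.List.len x.1 = k' then [x] else []) := by
      intro k'
      simp only [pvBucket, List.filter_append, List.filter_cons, List.filter_nil]
      split_ifs with h1 h2 h2 <;> simp_all
    by_cases hk : PySem.List.len x.1 = k
    · have hskip : ∀ y ∈ pvBucket l k,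
          (decide (PySem.List.len x.1 < PySem.List.len y.1)) = false := by
        intro y hy
        rw [mem_bucket l k y hy, hk]
        simp
      have hrest : ∀ y ∈ ks'.flatMap (fun k' => pvBucket l k'),
          (decide (PySem.List.len x.1 < PySem.List.len y.1)) = true := by
        intro y hy
        rcases List.mem_flatMap.1 hy with ⟨k', hk', hy'⟩
        rw [mem_bucket l k' y hy', hk]
        simp only [decide_eq_true_eq]
        exact hgt k' hk'
      have hnotin : ∀ k' ∈ ks', PySem.List.len x.1 ≠ k' := by
        intro k' h h'
        have := hgt k' h
        omega
      rw [List.flatMap_cons, insertBy_append_skip _ _ _ _ hskip,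
        insertBy_all_before _ _ _ hrest, List.flatMap_cons, hbucket k, if_pos hk]
      have htail : ks'.flatMap (fun k' => pvBucket (l ++ [x]) k')
          = ks'.flatMap (fun k' => pvBucket l k') := by
        refine List.flatMap_congr (fun k' h => ?_)
        rw [hbucket k', if_neg (hnotin k' h), List.append_nil]
      rw [htail]
      simp
    · have hx' : PySem.List.len x.1 ∈ ks' := by
        rcases List.mem_cons.1 hx with h | h
        · exact absurd h hk
        · exact h
      have hxk : k < PySem.List.len x.1 := hgt _ hx'
      have hskip : ∀ y ∈ pvBucket l k,
          (decide (PySem.List.len x.1 < PySem.List.len y.1)) = false := by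
        intro y hy
        rw [mem_bucket l k y hy]
        simp only [decide_eq_false_iff_not]
        omega
      rw [List.flatMap_cons, insertBy_append_skip _ _ _ _ hskip,
        ih (List.pairwise_cons.1 hp).2 hx', List.flatMap_cons, hbucket k, if_neg hk,
        List.append_nil]

-- stable sort = buckets in increasing key order
lemma sorted_eq_flat (ks : List Int) (hp : ks.Pairwise (· < ·)) (l : List (List Int × Int))
    (hmem : ∀ p ∈ l, PySem.List.len p.1 ∈ ks) :
    PySem.List.sorted l (fun p => PySem.List.len p.1) false
      = ks.flatMap (fun k => pvBucket l k) := by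
  induction l using List.reverseRecOn with
  | nil => simp [PySem.List.sorted, pvBucket]
  | append_singleton l x ih =>
    rw [PySem.List.sorted_eq_foldl_insertBy, List.foldl_append, List.foldl_cons,
      List.foldl_nil, ← PySem.List.sorted_eq_foldl_insertBy,
      ih (fun p hp' => hmem p (by simp [hp']))]
    exact insertBy_flat ks hp x (hmem x (by simp)) l

-- counting: length of the bucketed form
lemma countP_cons_mem (l : List (List Int × Int)) (k : Int) (ks' : List Int) (hk : k ∉ ks') :
    l.countP (fun p => decide (PySem.List.len p.1 = k))
      + l.countP (fun p => decide (PySem.List.len p.1 ∈ ks'))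
    = l.countP (fun p => decide (PySem.List.len p.1 ∈ (k :: ks'))) := by
  induction l with
  | nil => simp
  | cons p t ih =>
    by_cases h1 : PySem.List.len p.1 = k <;> by_cases h2 : PySem.List.len p.1 ∈ ks' <;>
      simp_all <;> omega

lemma flat_length (ks : List Int) (hp : ks.Pairwise (· < ·)) (l : List (List Int × Int)) :
    (ks.flatMap (fun k => pvBucket l k)).length
      = l.countP (fun p => decide (PySem.List.len p.1 ∈ ks)) := by
  induction ks with
  | nil => simp
  | cons k ks' ih =>
    have hk : k ∉ ks' := by
      intro h
      exact absurd ((List.pairwise_cons.1 hp).1 k h) (by omega)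
    rw [List.flatMap_cons, List.length_append, ih (List.pairwise_cons.1 hp).2,
      ← countP_cons_mem l k ks' hk, pvBucket, ← List.countP_eq_length_filter]

-- one unfolding of the while loop
lemma pvLoopA_succ (xs : List (List Int)) (fuel : Nat) (aux : Int)
    (acc : List (List Int × Int)) :
    pvLoopA xs (fuel + 1) aux acc
      = if PySem.List.len acc ≠ PySem.List.len xs then
          pvLoopA xs fuel (aux + 1) (pvPassA xs aux acc)
        else acc := rfl

-- the one inner pass: appends exactly the aux-bucket of the enumerated pairs
lemma pass_fold (aux : Int) (xs : List (List Int)) :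
    ∀ (acc : List (List Int × Int)) (i : Int),
    (xs.foldl
      (fun (s : List (List Int × Int) × Int) array =>
        (if PySem.List.len array = aux then s.1 ++ [(array, s.2)] else s.1, s.2 + 1))
      (acc, i))
    = (acc ++ pvBucket ((PySem.List.enumerate xs i).map (fun p => (p.2, p.1))) aux,
        i + xs.length) := by
  induction xs with
  | nil => intro acc i; simp [PySem.List.enumerate, pvBucket]
  | cons x t ih =>
    intro acc i
    rw [List.foldl_cons]
    by_cases h : PySem.List.len x = aux
    · have h' : ((x.length : Int) = aux) := by rw [← PySem.List.len_eq]; exact h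
      rw [if_pos h, ih (acc ++ [(x, i)]) (i + 1)]
      refine Prod.ext ?_ ?_
      · simp [PySem.List.enumerate, pvBucket, h', List.append_assoc]
      · simp
        omega
    · have h' : ¬ ((x.length : Int) = aux) := by rw [← PySem.List.len_eq]; exact h
      rw [if_neg h, ih acc (i + 1)]
      refine Prod.ext ?_ ?_
      · simp [PySem.List.enumerate, pvBucket, h']
      · simp
        omega

lemma passA_eq (xs : List (List Int)) (aux : Int) (acc : List (List Int × Int)) :
    pvPassA xs aux acc = acc ++ pvBucket (pvPairs xs) aux := by
  unfold pvPassA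
  rw [pass_fold aux xs acc 0]
  simp [pvPairs]

-- under Pre_, every pair's key lies in 1..maxLen
lemma key_mem_ks (xs : List (List Int)) (hpre : Pre_ordena_por_nodes xs)
    (p : List Int × Int) (hp : p ∈ pvPairs xs) :
    PySem.List.len p.1 ∈ pvKs (xs.foldl (fun m a => max m a.length) 0) := by
  have hmem := pvPairs_fst_mem xs p hp
  have h1 : p.1 ≠ [] := hpre p.1 hmem
  have h2 := max_len_bound xs p.1 hmem
  have h3 : 1 ≤ p.1.length := by
    cases hq : p.1 with
    | nil => exact absurd hq h1
    | cons a t => simp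
  rw [pvKs_mem, PySem.List.len_eq]
  omega

-- the while loop, from the state after j full iterations
lemma loop_eq (xs : List (List Int)) (hpre : Pre_ordena_por_nodes xs) :
    ∀ (m j : Nat), j + m = xs.foldl (fun m a => max m a.length) 0 →
    pvLoopA xs (m + 1) ((j : Int) + 1) (pvFlat (pvPairs xs) j)
      = pvFlat (pvPairs xs) (xs.foldl (fun m a => max m a.length) 0) := by
  intro m
  induction m with
  | zero =>
    intro j hj
    have hjN : xs.foldl (fun m a => max m a.length) 0 = j := by omega
    rw [hjN]
    have hlen : (pvFlat (pvPairs xs) j).length = xs.length := by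
      rw [pvFlat, flat_length _ (pvKs_pairwise j)]
      refine (List.countP_eq_length.2 (fun p hp => ?_)).trans (pvPairs_length xs)
      have hm := key_mem_ks xs hpre p hp
      rw [hjN] at hm
      simpa using hm
    rw [pvLoopA_succ, if_neg (by simp [PySem.List.len_eq, hlen])]
  | succ m ih =>
    intro j hj
    by_cases hstop : (pvFlat (pvPairs xs) j).length = xs.length
    · -- the loop exits early: all pairs are already placed, later buckets are empty
      have hcount : (pvPairs xs).countP
          (fun p => decide (PySem.List.len p.1 ∈ pvKs j)) = (pvPairs xs).length := by
        rw [← flat_length _ (pvKs_pairwise j), ← pvFlat, hstop, pvPairs_length]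
      have hall : ∀ p ∈ pvPairs xs, PySem.List.len p.1 ∈ pvKs j := fun p hp => by
        simpa using List.countP_eq_length.1 hcount p hp
      have hemp : ∀ k : Int, (j : Int) < k → pvBucket (pvPairs xs) k = [] := by
        intro k hk
        rw [pvBucket, List.filter_eq_nil_iff]
        intro p hp
        have hple := (pvKs_mem j _).1 (hall p hp)
        simp only [decide_eq_true_eq]
        omega
      have hstep : ∀ n : Nat, pvFlat (pvPairs xs) (j + n) = pvFlat (pvPairs xs) j := by
        intro n
        induction n with
        | zero => rfl
        | succ n ihn =>
          rw [show j + (n + 1) = (j + n) + 1 from rfl, pvFlat, pvKs_succ,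
            List.flatMap_append, ← pvFlat, ihn]
          rw [List.flatMap_cons, List.flatMap_nil,
            hemp (((j + n : Nat) : Int) + 1) (by push_cast; omega)]
          simp
      have hflat : pvFlat (pvPairs xs) (xs.foldl (fun m a => max m a.length) 0)
          = pvFlat (pvPairs xs) j := by
        rw [← hj, hstep (m + 1)]
      rw [pvLoopA_succ, if_neg (by simp [PySem.List.len_eq, hstop]), hflat]
    · have hstep : pvPassA xs ((j : Int) + 1) (pvFlat (pvPairs xs) j)
          = pvFlat (pvPairs xs) (j + 1) := by
        rw [passA_eq, pvFlat, pvFlat, pvKs_succ, List.flatMap_append]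
        simp
      have hcond : PySem.List.len (pvFlat (pvPairs xs) j) ≠ PySem.List.len xs := by
        simp only [PySem.List.len_eq, ne_eq, Int.natCast_inj]
        exact hstop
      rw [pvLoopA_succ, if_pos hcond, hstep,
        show ((j : Int) + 1) + 1 = (((j + 1 : Nat) : Int) + 1) from by push_cast; ring]
      exact ih (j + 1) (by omega)

-- ===== VERDICT (by name: the statement is the Claim_ definition above) =====
theorem ordena_por_nodes_spec : Claim_equal_ordena_por_nodes := by
  intro xs _ hpre
  unfold Spec_ordena_por_nodes
  have hA : ordena_por_nodes xs
      = pvFlat (pvPairs xs) (xs.foldl (fun m a => max m a.length) 0) := by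
    have h := loop_eq xs hpre (xs.foldl (fun m a => max m a.length) 0) 0 (by omega)
    simpa [ordena_por_nodes, pvFlat, pvKs] using h
  have hB : ordena_por_nodes_alt xs
      = pvFlat (pvPairs xs) (xs.foldl (fun m a => max m a.length) 0) := by
    rw [ordena_por_nodes_alt, ← pvPairs, pvFlat]
    exact sorted_eq_flat _ (pvKs_pairwise _) _ (key_mem_ks xs hpre)
  rw [hA, hB]
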